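-- pv_equiv track=rewrite | github.com/volhaTaler/hyperskill | matrices_manipulation.py | side_diagonal
-- ===== SOURCE A (Python) =====
-- def params(matrix):
--     return len(matrix), len(matrix[0])
--
-- def transposed_muster(col):
--     matrix = []
--     for i in range(col):
--         matrix.append([])
--     return matrix
--
-- def side_diagonal(matrix):
--     n, m = params(matrix)
--     mtr = transposed_muster(m)
--     for row in matrix:
--         row = row[::-1]
--         for i, cell in enumerate(row):
--             mtr[i].insert(0,cell)
--     return mtr
-- ===== SOURCE B (Python) =====
-- def side_diagonal(matrix):
--     cols = [[] for _ in matrix[0]]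
--     rotated = [row[::-1] for row in reversed(matrix)]
--     for row in rotated:
--         for i, cell in enumerate(row):
--             cols[i].append(cell)
--     return cols
-- ===== Notes on version B (the rewrite author's own statement) =====
-- stated objective: faster
-- what changed: B rotates the matrix 180 degrees up front (reversed rows of reversed(matrix)) and scatters each rotated row into column lists with O(1) appends, replacing A's forward pass that front-inserts every cell with list.insert(0, ...); Pre_ excludes only the inputs where A raises IndexError (the empty matrix and matrices with a row longer than the first), where B raises the same error.
import Mathlib
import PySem

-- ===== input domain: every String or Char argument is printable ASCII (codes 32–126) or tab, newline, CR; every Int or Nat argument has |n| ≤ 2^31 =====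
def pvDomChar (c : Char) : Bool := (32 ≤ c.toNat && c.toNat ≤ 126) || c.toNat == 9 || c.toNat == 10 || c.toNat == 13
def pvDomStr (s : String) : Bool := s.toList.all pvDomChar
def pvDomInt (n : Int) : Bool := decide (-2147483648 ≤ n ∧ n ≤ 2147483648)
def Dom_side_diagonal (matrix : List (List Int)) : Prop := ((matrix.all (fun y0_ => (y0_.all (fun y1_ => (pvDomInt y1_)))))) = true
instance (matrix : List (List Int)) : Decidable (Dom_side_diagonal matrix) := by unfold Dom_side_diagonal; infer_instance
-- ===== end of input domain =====

-- B rotates the matrix 180° first and scatter-transposes it with appends, replacing A's per-cell front-insertion (faster: no per-cell column shifting).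


-- ===== PORT A =====
-- params(matrix): matrix[0] raises on empty (excluded by Pre_); headD is exact inside Pre_
def pyParams (matrix : List (List Int)) : Nat × Nat :=
  (matrix.length, (matrix.headD []).length)

def transposed_muster (col : Nat) : List (List Int) :=
  -- for i in range(col): matrix.append([])
  (List.range col).foldl (fun acc _ => acc ++ [([] : List Int)]) []

def side_diagonal (matrix : List (List Int)) : List (List Int) :=
  let p := pyParams matrix
  let mtr := transposed_muster p.2
  matrix.foldl (fun mtr row =>
    let r := row.reverse        -- row[::-1]
    (PySem.List.enumerate r 0).foldl (fun mtr ic =>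
      -- mtr[i].insert(0, cell): prepend; out-of-range i raises in Python (excluded by Pre_)
      mtr.modify ic.1.toNat (fun l => ic.2 :: l)) mtr) mtr

-- ===== PORT B =====
def side_diagonal_alt (matrix : List (List Int)) : List (List Int) :=
  let cols := (matrix.headD []).map (fun _ => ([] : List Int))   -- [[] for _ in matrix[0]]; matrix[0] raises on empty (excluded by Pre_)
  let rotated := matrix.reverse.map (fun row => row.reverse)     -- [row[::-1] for row in reversed(matrix)]
  rotated.foldl (fun cols row =>
    (PySem.List.enumerate row 0).foldl (fun cols ic =>
      -- cols[i].append(cell): out-of-range i raises in Python (excluded by Pre_)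
      cols.modify ic.1.toNat (fun l => l ++ [ic.2])) cols) cols

-- ===== PRECONDITION & SPEC =====
-- Pre_ excludes exactly the inputs where Python A raises IndexError: the empty matrix
-- (matrix[0]) and matrices with a row longer than the first (mtr[i] out of range).
def Pre_side_diagonal (matrix : List (List Int)) : Prop :=
  matrix ≠ [] ∧ ∀ row ∈ matrix, row.length ≤ (matrix.headD []).length
instance (matrix : List (List Int)) : Decidable (Pre_side_diagonal matrix) := by
  unfold Pre_side_diagonal; infer_instance

def pvWitness_side_diagonal : List (List Int) := [[1, 2, 3], [4, 5, 6]]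

def Spec_side_diagonal (matrix : List (List Int)) (out : List (List Int)) : Prop := out = side_diagonal_alt matrix
instance (matrix : List (List Int)) (out : List (List Int)) : Decidable (Spec_side_diagonal matrix out) := by unfold Spec_side_diagonal; infer_instance

-- ===== CLAIM (what is proved, stated in full; the proofs are below) =====
def Claim_equal_side_diagonal : Prop := ∀ (matrix : List (List Int)), Dom_side_diagonal matrix → Pre_side_diagonal matrix → Spec_side_diagonal matrix (side_diagonal matrix)

-- ===== LEMMAS AND PROOFS =====

-- the per-row contribution to column j (for a row of the original matrix)
def contrib (i : Nat) (row : List Int) : Option Int :=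
  if i < row.length then some (row.getD (row.length - 1 - i) 0) else none

theorem transposed_muster_eq (col : Nat) : transposed_muster col = List.replicate col [] := by
  unfold transposed_muster
  induction col with
  | zero => simp
  | succ k ih => simp [List.range_succ, ih, List.replicate_succ']

-- the indexed cells of an enumerated list, filtered to index j
theorem enumerate_filterMap_key (r : List Int) (j : Nat) :
    ((PySem.List.enumerate r 0).map (fun ic => (ic.1.toNat, ic.2))).filterMap
      (fun p : Nat × Int => if p.1 = j then some p.2 else none)
    = (if h : j < r.length then [r[j]] else []) := by
  induction r using List.reverseRecOn with
  | nil => simp [PySem.List.enumerate]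
  | append_singleton xs x ih =>
      rw [PySem.List.enumerate_append]
      simp only [List.map_append, List.filterMap_append]
      rw [ih]
      by_cases h : j < xs.length
      · have hne : ¬ ((0 + (xs.length : Int)).toNat = j) := by omega
        simp [PySem.List.enumerate, h, Nat.lt_of_lt_of_le h (Nat.le_succ _)]
        omega
      · by_cases h2 : j < xs.length + 1
        · have hj : j = xs.length := by omega
          simp [PySem.List.enumerate, hj]
        · have hne : ¬ (xs.length = j) := by omega
          simp [PySem.List.enumerate, h, h2, hne]

-- ===== A side: a fold of modify-prepends, pointwise =====
theorem foldl_modify_getElem? (ps : List (Nat × Int)) (acc : List (List Int)) (j : Nat) :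
    (ps.foldl (fun a p => a.modify p.1 (fun l => p.2 :: l)) acc)[j]? =
      (acc[j]?).map (fun l => ps.reverse.filterMap
        (fun p => if p.1 = j then some p.2 else none) ++ l) := by
  induction ps generalizing acc with
  | nil => simp
  | cons p ps ih =>
      simp only [List.foldl_cons, ih, List.reverse_cons, List.filterMap_append,
        List.filterMap_cons, List.filterMap_nil]
      rw [List.getElem?_modify]
      by_cases h : p.1 = j
      · simp [h, List.append_assoc, Function.comp_def]
      · simp [h]

-- A's inner loop prepends exactly contrib j row to column j
theorem step_getElem? (row : List Int) (acc : List (List Int)) (j : Nat) :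
    ((PySem.List.enumerate row.reverse 0).foldl
        (fun a ic => a.modify ic.1.toNat (fun l => ic.2 :: l)) acc)[j]? =
      (acc[j]?).map (fun l => (contrib j row).toList ++ l) := by
  have key : ∀ (r : List Int),
      ((PySem.List.enumerate r 0).map (fun ic => (ic.1.toNat, ic.2))).reverse.filterMap
        (fun p : Nat × Int => if p.1 = j then some p.2 else none)
      = (if h : j < r.length then [r[j]] else []) := by
    intro r
    induction r using List.reverseRecOn with
    | nil => simp [PySem.List.enumerate]
    | append_singleton xs x ih =>
        rw [PySem.List.enumerate_append]
        simp only [List.map_append, List.reverse_append, List.filterMap_append]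
        rw [ih]
        by_cases h : j < xs.length
        · have hne : ¬ ((0 + (xs.length : Int)).toNat = j) := by omega
          simp [PySem.List.enumerate, h, Nat.lt_of_lt_of_le h (Nat.le_succ _)]
          omega
        · by_cases h2 : j < xs.length + 1
          · have hj : j = xs.length := by omega
            simp [PySem.List.enumerate, hj]
          · have hne : ¬ (xs.length = j) := by omega
            simp [PySem.List.enumerate, h, h2, hne]
  have := foldl_modify_getElem?
    ((PySem.List.enumerate row.reverse 0).map (fun ic => (ic.1.toNat, ic.2))) acc j
  rw [List.foldl_map] at this
  rw [this, key row.reverse]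
  congr 1
  funext l
  congr 1
  unfold contrib
  by_cases h : j < row.length
  · simp [h, List.getElem_reverse, List.getD_eq_getElem?_getD,
      show row.length - 1 - j < row.length by omega]
  · simp [h]

-- A's outer loop, pointwise
theorem outer_getElem? (xs : List (List Int)) (acc : List (List Int)) (j : Nat) :
    (xs.foldl (fun mtr row =>
        (PySem.List.enumerate row.reverse 0).foldl
          (fun a ic => a.modify ic.1.toNat (fun l => ic.2 :: l)) mtr) acc)[j]? =
      (acc[j]?).map (fun l => xs.reverse.filterMap (contrib j) ++ l) := by
  induction xs generalizing acc with
  | nil => simp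
  | cons row xs ih =>
      simp only [List.foldl_cons, ih, step_getElem?, List.reverse_cons,
        List.filterMap_append, List.filterMap_cons, List.filterMap_nil]
      cases hacc : acc[j]? with
      | none => simp
      | some l =>
          simp only [Option.map_some]
          congr 1
          cases h : contrib j row <;> simp [List.append_assoc]

-- ===== B side: a fold of modify-appends, pointwise =====
theorem foldl_modify_append_getElem? (ps : List (Nat × Int)) (acc : List (List Int)) (j : Nat) :
    (ps.foldl (fun a p => a.modify p.1 (fun l => l ++ [p.2])) acc)[j]? =
      (acc[j]?).map (fun l => l ++ ps.filterMap
        (fun p => if p.1 = j then some p.2 else none)) := by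
  induction ps generalizing acc with
  | nil => simp
  | cons p ps ih =>
      simp only [List.foldl_cons, ih, List.filterMap_cons]
      rw [List.getElem?_modify]
      by_cases h : p.1 = j
      · simp [h, List.append_assoc, Function.comp_def]
      · simp [h]

-- B's inner loop appends exactly the rotated row's cell j to column j
theorem stepB_getElem? (row : List Int) (acc : List (List Int)) (j : Nat) :
    ((PySem.List.enumerate row 0).foldl
        (fun a ic => a.modify ic.1.toNat (fun l => l ++ [ic.2])) acc)[j]? =
      (acc[j]?).map (fun l => l ++ (if h : j < row.length then [row[j]] else [])) := by
  have := foldl_modify_append_getElem?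
    ((PySem.List.enumerate row 0).map (fun ic => (ic.1.toNat, ic.2))) acc j
  rw [List.foldl_map] at this
  rw [this, enumerate_filterMap_key row j]

-- B's outer loop, pointwise (over the rotated rows)
theorem outerB_getElem? (xs : List (List Int)) (acc : List (List Int)) (j : Nat) :
    (xs.foldl (fun cols row =>
        (PySem.List.enumerate row 0).foldl
          (fun a ic => a.modify ic.1.toNat (fun l => l ++ [ic.2])) cols) acc)[j]? =
      (acc[j]?).map (fun l => l ++ xs.filterMap
        (fun row => if h : j < row.length then some row[j] else none)) := by
  induction xs generalizing acc with
  | nil => simp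
  | cons row xs ih =>
      simp only [List.foldl_cons, ih, stepB_getElem?, List.filterMap_cons]
      cases hacc : acc[j]? with
      | none => simp
      | some l =>
          simp only [Option.map_some]
          congr 1
          by_cases h : j < row.length <;> simp [h, List.append_assoc]

-- reading cell j of a reversed row is A's contrib
theorem contrib_reverse (row : List Int) (j : Nat) :
    (if h : j < row.reverse.length then some row.reverse[j] else none) = contrib j row := by
  unfold contrib
  by_cases h : j < row.length
  · simp [h, List.getElem_reverse, List.getD_eq_getElem?_getD,
      List.getElem?_eq_getElem (show row.length - 1 - j < row.length by omega)]
  · simp [h]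

theorem main_eq (matrix : List (List Int)) :
    side_diagonal matrix = side_diagonal_alt matrix := by
  apply List.ext_getElem?
  intro j
  have hA : (side_diagonal matrix)[j]? =
      ((List.replicate (matrix.headD []).length ([] : List Int))[j]?).map
        (fun l => matrix.reverse.filterMap (contrib j) ++ l) := by
    simp only [side_diagonal]
    rw [show pyParams matrix = (matrix.length, (matrix.headD []).length) from rfl]
    rw [transposed_muster_eq]
    exact outer_getElem? matrix _ j
  have hB : (side_diagonal_alt matrix)[j]? =
      (((matrix.headD []).map (fun _ => ([] : List Int)))[j]?).map
        (fun l => l ++ matrix.reverse.filterMap (contrib j)) := by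
    simp only [side_diagonal_alt]
    rw [outerB_getElem?]
    congr 1
    funext l
    rw [List.filterMap_map]
    congr 1
    exact List.filterMap_congr (fun row _ => contrib_reverse row j)
  rw [hA, hB, List.getElem?_map, List.getElem?_replicate]
  by_cases h : j < (matrix.headD []).length
  · rw [if_pos h, List.getElem?_eq_getElem h]
    simp
  · rw [if_neg h, List.getElem?_eq_none (by simpa using h)]
    simp

-- ===== VERDICT (by name: the statement is the Claim_ definition above) =====
theorem side_diagonal_spec : Claim_equal_side_diagonal := by
  intro matrix _ _
  exact main_eq matrix
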